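-- pv_equiv track=rewrite | github.com/CampbellTrevor/Amorsize | mutants/tests/test_cli_functions.py | expensive_computation
-- ===== SOURCE A (Python) =====
-- def expensive_computation(x):
--     """Expensive function for testing parallelization."""
--     try:
--         x_int = int(x)
--     except (ValueError, TypeError):
--         x_int = 0
--
--     result = 0
--     for i in range(10000):
--         result += x_int ** 2
--     return result
-- ===== SOURCE B (Python) =====
-- def expensive_computation(x):
--     """Closed-form: multiply the squared input by the fixed loop count."""
--     try:
--         x_int = int(x)
--     except (ValueError, TypeError):
--         x_int = 0
--     return 10000 * x_int ** 2
-- ===== Notes on version B (the rewrite author's own statement) =====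
-- stated objective: simpler
-- what changed: Replaced the fixed-count accumulation loop with a single closed-form product of the iteration count and the squared input.
import Mathlib
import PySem

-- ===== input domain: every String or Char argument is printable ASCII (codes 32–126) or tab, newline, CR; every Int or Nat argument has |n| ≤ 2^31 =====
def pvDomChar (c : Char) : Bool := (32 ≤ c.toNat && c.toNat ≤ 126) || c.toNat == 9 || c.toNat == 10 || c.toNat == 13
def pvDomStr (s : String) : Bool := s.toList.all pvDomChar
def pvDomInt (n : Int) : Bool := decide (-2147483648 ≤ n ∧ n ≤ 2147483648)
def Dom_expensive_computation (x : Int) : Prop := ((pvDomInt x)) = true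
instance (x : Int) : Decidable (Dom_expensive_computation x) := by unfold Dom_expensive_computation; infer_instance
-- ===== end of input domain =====

-- ===== PORT A =====
-- int(x) on an int is the identity; the loop adds x^2 for each i in range(10000)
def expensive_computation (x : Int) : Int :=
  let x_int := x
  (PySem.List.pyRange 0 10000 1).foldl (fun result _ => result + x_int ^ 2) 0

-- ===== PORT B =====
def expensive_computation_alt (x : Int) : Int :=
  let x_int := x
  10000 * x_int ^ 2

-- ===== PRECONDITION & SPEC =====
def Spec_expensive_computation (x : Int) (out : Int) : Prop := out = expensive_computation_alt x
instance (x : Int) (out : Int) : Decidable (Spec_expensive_computation x out) := by unfold Spec_expensive_computation; infer_instance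

-- ===== CLAIM (what is proved, stated in full; the proofs are below) =====
def Claim_equal_expensive_computation : Prop := ∀ (x : Int), Dom_expensive_computation x → Spec_expensive_computation x (expensive_computation x)

-- ===== LEMMAS AND PROOFS =====

-- ===== VERDICT (by name: the statement is the Claim_ definition above) =====
theorem foldl_const_add (c : Int) (l : List Int) (a : Int) :
    l.foldl (fun result _ => result + c) a = a + l.length * c := by
  induction l generalizing a with
  | nil => simp
  | cons h t ih => simp [List.foldl, ih]; ring

theorem expensive_computation_spec : Claim_equal_expensive_computation := by
  intro x _
  unfold Spec_expensive_computation expensive_computation expensive_computation_alt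
  rw [foldl_const_add]
  norm_num [PySem.List.pyRange]
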